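-- pv_equiv track=rewrite | github.com/dolutio/KappakClient | KappakMobileClient/kappak_crypt.py | gen_custom_key
-- ===== SOURCE A (Python) =====
-- def gen_custom_key(custom_key_text: str) -> int:
--     custom_key: int = 0
--
--     if custom_key_text.isdigit():
--         custom_key = int(custom_key_text)
--
--     else:
--         for i, ch in enumerate(custom_key_text):
--             custom_key += ord(custom_key_text[i]) + i % 7
--
--     return custom_key
-- ===== SOURCE B (Python) =====
-- def gen_custom_key(custom_key_text: str) -> int:
--     if custom_key_text.isdigit():
--         return int(custom_key_text)
--     base = sum(ord(ch) for ch in custom_key_text)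
--     n = len(custom_key_text)
--     r = n % 7
--     return base + 21 * (n // 7) + (r * (r - 1)) // 2
-- ===== Notes on version B (the rewrite author's own statement) =====
-- stated objective: faster
-- what changed: The loop-carried i%7 offset accumulation is replaced by one ord-sum pass plus a constant-time closed form 21*(n//7) + r*(r-1)//2 for the sum of i%7 over i<n.
import Mathlib
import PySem

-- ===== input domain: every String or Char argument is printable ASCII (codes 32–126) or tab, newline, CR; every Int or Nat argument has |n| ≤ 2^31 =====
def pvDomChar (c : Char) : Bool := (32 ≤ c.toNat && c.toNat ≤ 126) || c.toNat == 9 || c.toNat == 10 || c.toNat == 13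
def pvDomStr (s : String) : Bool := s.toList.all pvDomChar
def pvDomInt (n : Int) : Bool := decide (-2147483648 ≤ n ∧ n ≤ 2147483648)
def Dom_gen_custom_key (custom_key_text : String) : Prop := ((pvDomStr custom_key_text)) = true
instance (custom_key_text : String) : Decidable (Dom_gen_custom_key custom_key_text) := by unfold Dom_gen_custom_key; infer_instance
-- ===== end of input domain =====

-- B replaces A's loop-carried i%7 accumulation by an ord-sum plus the closed form
-- 21*(n//7) + r*(r-1)//2 (r = n % 7); the isdigit guard branch is unchanged.
-- On the ASCII domain isdigit() implies int() succeeds, so the `.getD 0` default is never hit.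

-- ===== PORT A =====
def gen_custom_key (custom_key_text : String) : Int :=
  if PySem.Str.strIsdigit custom_key_text then (PySem.Int.ofStr? custom_key_text).getD 0
  else
    (PySem.List.enumerate custom_key_text.toList).foldl
      (fun acc p =>
        acc + ((PySem.List.pyGetD custom_key_text.toList p.1 p.2).toNat : Int)
            + PySem.Int.mod p.1 7) 0

-- ===== PORT B =====
def gen_custom_key_alt (custom_key_text : String) : Int :=
  if PySem.Str.strIsdigit custom_key_text then (PySem.Int.ofStr? custom_key_text).getD 0
  else
    let base : Int := (custom_key_text.toList.map (fun ch => (ch.toNat : Int))).sum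
    let n : Int := PySem.Str.len custom_key_text
    let r : Int := PySem.Int.mod n 7
    base + 21 * PySem.Int.floordiv n 7 + PySem.Int.floordiv (r * (r - 1)) 2

-- ===== PRECONDITION & SPEC =====
def Spec_gen_custom_key (custom_key_text : String) (out : Int) : Prop := out = gen_custom_key_alt custom_key_text
instance (custom_key_text : String) (out : Int) : Decidable (Spec_gen_custom_key custom_key_text out) := by unfold Spec_gen_custom_key; infer_instance

-- ===== CLAIM (what is proved, stated in full; the proofs are below) =====
def Claim_equal_gen_custom_key : Prop := ∀ (custom_key_text : String), Dom_gen_custom_key custom_key_text → Spec_gen_custom_key custom_key_text (gen_custom_key custom_key_text)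

-- ===== LEMMAS AND PROOFS =====

-- sum of (0 % 7) + (1 % 7) + … + ((n-1) % 7)
def offSum : Nat → Int
  | 0 => 0
  | n + 1 => offSum n + PySem.Int.mod (n : Int) 7

def ordSum (cs : List Char) : Int := (cs.map (fun ch => (ch.toNat : Int))).sum

lemma foldl_body (cs : List Char) :
    (PySem.List.enumerate cs).foldl
      (fun acc (p : Int × Char) => acc + (p.2.toNat : Int) + PySem.Int.mod p.1 7) 0
    = ordSum cs + offSum cs.length := by
  induction cs using List.reverseRecOn with
  | nil => simp [PySem.List.enumerate, ordSum, offSum]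
  | append_singleton cs c ih =>
    rw [PySem.List.enumerate_append, List.foldl_append, ih]
    simp [PySem.List.enumerate_cons, PySem.List.enumerate_nil, ordSum, offSum]
    omega

lemma offSum_closed (n : Nat) :
    offSum n = 21 * PySem.Int.floordiv (n : Int) 7
      + PySem.Int.floordiv (PySem.Int.mod (n : Int) 7 * (PySem.Int.mod (n : Int) 7 - 1)) 2 := by
  induction n with
  | zero => simp [offSum]
  | succ n ih =>
    rw [offSum, ih]
    simp only [PySem.Int.mod_eq_emod_of_pos (show (0:Int) < 7 by norm_num),
      PySem.Int.floordiv_eq_ediv_of_pos (show (0:Int) < 7 by norm_num),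
      PySem.Int.floordiv_eq_ediv_of_pos (show (0:Int) < 2 by norm_num)]
    have h0 : 0 ≤ (n : Int) % 7 := Int.emod_nonneg _ (by norm_num)
    have h7 : (n : Int) % 7 < 7 := Int.emod_lt_of_pos _ (by norm_num)
    push_cast
    rw [show ((n : Int) + 1) % 7 = ((n : Int) % 7 + 1) % 7 by omega]
    interval_cases h : (n : Int) % 7 <;> norm_num <;> omega

-- ===== VERDICT (by name: the statement is the Claim_ definition above) =====
theorem gen_custom_key_spec : Claim_equal_gen_custom_key := by
  intro s _
  unfold Spec_gen_custom_key gen_custom_key gen_custom_key_alt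
  by_cases hd : PySem.Str.strIsdigit s
  · rw [if_pos hd, if_pos hd]
  · rw [if_neg hd, if_neg hd]
    rw [PySem.List.foldl_congr_mem _ _
        (fun acc (p : Int × Char) => acc + (p.2.toNat : Int) + PySem.Int.mod p.1 7) 0
        (by
          intro acc p hp
          rw [PySem.List.mem_enumerate_iff] at hp
          obtain ⟨k, hk, rfl⟩ := hp
          simp [PySem.List.pyGetD_natCast, List.getD_eq_getElem?_getD, List.getElem?_eq_getElem hk])]
    rw [foldl_body, offSum_closed]
    simp only [ordSum, PySem.Str.len_eq]
    rw [← add_assoc]
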